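-- pv_equiv track=rewrite | github.com/kyungmin1221/CodingTest | 프로그래머스/2/42584. 주식가격/주식가격.py | solution
-- ===== SOURCE A (Python) =====
-- from collections import deque
--
-- def solution(prices):
--     queue = deque()
--     answer = []
--     count = 0
--     for i in prices:
--         queue.append(i)
--
--     while queue:
--         cur = queue.popleft()       # 3
--         for time in queue:
--             if time >= cur:
--                 count += 1
--                 continue
--             else:
--                 count += 1
--                 break
--         answer.append(count)
--         count = 0
--
--     return answer
-- ===== SOURCE B (Python) =====
-- def solution(prices):
--     n = len(prices)
--     answer = [0] * n
--     stack = []  # indices with no price drop seen yet; prices non-decreasing bottom->top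
--     for i, p in enumerate(prices):
--         while stack and prices[stack[-1]] > p:
--             j = stack.pop()
--             answer[j] = i - j
--         stack.append(i)
--     for j in stack:
--         answer[j] = n - 1 - j
--     return answer
-- ===== Notes on version B (the rewrite author's own statement) =====
-- stated objective: faster
-- what changed: Replaced A's per-element rescan of the remaining queue (quadratic) by a monotonic stack of unresolved indices that resolves each drop time once, in a single pass.
import Mathlib
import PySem

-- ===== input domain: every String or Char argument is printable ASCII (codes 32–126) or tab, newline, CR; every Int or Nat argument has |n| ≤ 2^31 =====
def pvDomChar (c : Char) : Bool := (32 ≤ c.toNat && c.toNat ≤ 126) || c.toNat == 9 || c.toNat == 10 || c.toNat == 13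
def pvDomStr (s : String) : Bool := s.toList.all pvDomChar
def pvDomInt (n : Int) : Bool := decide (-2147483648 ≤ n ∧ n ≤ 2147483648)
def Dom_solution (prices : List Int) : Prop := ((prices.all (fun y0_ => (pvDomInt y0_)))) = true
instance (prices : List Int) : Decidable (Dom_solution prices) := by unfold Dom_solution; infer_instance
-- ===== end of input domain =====

-- B replaces A's quadratic rescan of the remaining queue by a one-pass monotonic stack
-- of unresolved indices (objective: faster, asymptotic).

-- ===== PORT A =====
-- inner 'for time in queue' loop: count elements until (and including) the first one < cur
def pvLoopA (cur : Int) : List Int → Int → Int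
  | [], count => count
  | t :: rest, count => if t ≥ cur then pvLoopA cur rest (count + 1) else count + 1

-- outer 'while queue' loop: popleft, scan the rest, append the count
def pvGoA : List Int → List Int
  | [] => []
  | cur :: rest => pvLoopA cur rest 0 :: pvGoA rest

def solution (prices : List Int) : List Int := pvGoA prices

-- ===== PORT B =====
-- prices[j]; every use has j in range, so getD is exact
def pvDD (l : List Int) (j : Nat) : Int := l.getD j 0

-- the 'while stack and prices[stack[-1]] > p' loop (stack head = Python stack top)
def pvPop (l : List Int) (p : Int) (i : Nat) : List Nat → List Int → List Nat × List Int
  | [], ans => ([], ans)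
  | j :: st, ans =>
    if pvDD l j > p then pvPop l p i st (ans.set j ((i : Int) - (j : Int)))
    else (j :: st, ans)

-- the 'for i, p in enumerate(prices)' loop
def pvGoB (l : List Int) : List (Int × Nat) → List Nat → List Int → List Nat × List Int
  | [], st, ans => (st, ans)
  | (p, i) :: rest, st, ans =>
    let r := pvPop l p i st ans
    pvGoB l rest (i :: r.1) r.2

def solution_alt (prices : List Int) : List Int :=
  let n := prices.length
  let r := pvGoB prices prices.zipIdx [] (List.replicate n 0)
  -- final 'for j in stack' runs bottom→top = reverse of our head-is-top list
  r.1.reverse.foldl (fun a j => a.set j ((n : Int) - 1 - (j : Int))) r.2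

-- ===== PRECONDITION & SPEC =====
def Spec_solution (prices : List Int) (out : List Int) : Prop := out = solution_alt prices
instance (prices : List Int) (out : List Int) : Decidable (Spec_solution prices out) := by unfold Spec_solution; infer_instance

-- ===== CLAIM (what is proved, stated in full; the proofs are below) =====
def Claim_equal_solution : Prop := ∀ (prices : List Int), Dom_solution prices → Spec_solution prices (solution prices)

-- ===== LEMMAS AND PROOFS =====

-- common specification: seconds until the price at index j drops
def pvF (cur : Int) (q : List Int) : Int :=
  match q.findIdx? (· < cur) with
  | some k => (k : Int) + 1
  | none => (q.length : Int)

def pvTgt (l : List Int) (j : Nat) : Int := pvF (l.getD j 0) (l.drop (j + 1))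

-- ---- A equals the specification ----

lemma pvLoopA_eq (cur : Int) : ∀ (q : List Int) (c : Int), pvLoopA cur q c = c + pvF cur q := by
  intro q
  induction q with
  | nil => intro c; simp [pvLoopA, pvF]
  | cons t rest ih =>
    intro c
    by_cases h : t ≥ cur
    · have hx : (decide (t < cur)) = false := by simp; omega
      rw [show pvLoopA cur (t :: rest) c = pvLoopA cur rest (c + 1) from by
        simp [pvLoopA, h], ih]
      simp only [pvF, List.findIdx?_cons, hx, Bool.false_eq_true, if_false]
      cases hf : rest.findIdx? (· < cur) with
      | none => simp; ring
      | some k => simp; ring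
    · have hx : (decide (t < cur)) = true := by simp; omega
      rw [show pvLoopA cur (t :: rest) c = c + 1 from by simp [pvLoopA, h]]
      simp only [pvF, List.findIdx?_cons, hx, if_true]
      norm_num

lemma pvGoA_eq : ∀ (l : List Int), pvGoA l = (List.range l.length).map (pvTgt l) := by
  intro l
  induction l with
  | nil => simp [pvGoA]
  | cons x xs ih =>
    simp only [pvGoA, ih, List.length_cons, List.range_succ_eq_map, List.map_cons, List.map_map]
    congr 1
    rw [pvLoopA_eq]
    simp [pvTgt]

-- ---- findIdx? characterisations ----

lemma findIdx?_some_of (c : Int) : ∀ (q : List Int) (t : Nat), t < q.length →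
    (∀ s, s < t → c ≤ q.getD s 0) → q.getD t 0 < c → q.findIdx? (· < c) = some t := by
  intro q
  induction q with
  | nil => intro t ht; simp at ht
  | cons x xs ih =>
    intro t ht hbefore hat
    cases t with
    | zero =>
      simp at hat
      simp [List.findIdx?_cons, hat]
    | succ t' =>
      have hx : c ≤ x := by have := hbefore 0 (Nat.succ_pos _); simpa using this
      have hx' : (decide (x < c)) = false := by simp; omega
      rw [List.findIdx?_cons, hx', if_neg (by simp)]
      rw [ih t' (by simpa using ht) (fun s hs => by simpa using hbefore (s+1) (by simp; omega))
        (by simpa using hat)]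
      rfl

lemma findIdx?_none_of (c : Int) : ∀ (q : List Int), (∀ s, s < q.length → c ≤ q.getD s 0) →
    q.findIdx? (· < c) = none := by
  intro q
  induction q with
  | nil => simp
  | cons x xs ih =>
    intro h
    have hx : c ≤ x := by have := h 0 (Nat.succ_pos _); simpa using this
    have hx' : (decide (x < c)) = false := by simp; omega
    rw [List.findIdx?_cons, hx', if_neg (by simp)]
    rw [ih (fun s hs => by simpa using h (s+1) (by simp; omega))]
    rfl

lemma getD_drop (l : List Int) (a s : Nat) :
    (l.drop a).getD s 0 = l.getD (a + s) 0 := by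
  rw [List.getD_eq_getElem?_getD, List.getD_eq_getElem?_getD, List.getElem?_drop]

lemma pvTgt_pop (l : List Int) (j i : Nat) (hj : j < i) (hi : i < l.length)
    (hno : ∀ m, j < m → m < i → l.getD j 0 ≤ l.getD m 0) (hlt : l.getD i 0 < l.getD j 0) :
    pvTgt l j = (i : Int) - (j : Int) := by
  unfold pvTgt pvF
  have hlen : i - j - 1 < (l.drop (j+1)).length := by simp [List.length_drop]; omega
  rw [findIdx?_some_of (l.getD j 0) (l.drop (j+1)) (i - j - 1) hlen
    (fun s hs => by rw [getD_drop l (j+1) s]; exact hno (j+1+s) (by omega) (by omega))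
    (by rw [getD_drop l (j+1) (i-j-1)]; have : j+1+(i-j-1) = i := by omega
        rw [this]; exact hlt)]
  push_cast; omega

lemma pvTgt_none (l : List Int) (j : Nat) (hj : j < l.length)
    (hno : ∀ m, j < m → m < l.length → l.getD j 0 ≤ l.getD m 0) :
    pvTgt l j = (l.length : Int) - 1 - (j : Int) := by
  unfold pvTgt pvF
  rw [findIdx?_none_of (l.getD j 0) (l.drop (j+1))
    (fun s hs => by
      rw [getD_drop l (j+1) s]
      exact hno (j+1+s) (by omega) (by simp [List.length_drop] at hs; omega))]
  simp [List.length_drop]; omega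

-- ---- the stack invariant ----

def pvR (l : List Int) (a b : Nat) : Prop := b < a ∧ l.getD b 0 ≤ l.getD a 0

def pvInv (l : List Int) (k : Nat) (st : List Nat) (ans : List Int) : Prop :=
  ans.length = l.length ∧
  st.Pairwise (pvR l) ∧
  (∀ j ∈ st, j < k) ∧
  (∀ j ∈ st, ∀ m, j < m → m < k → l.getD j 0 ≤ l.getD m 0) ∧
  (∀ j, j < k → j ∉ st → ans.getD j 0 = pvTgt l j)

lemma pvPop_spec (l : List Int) (i : Nat) (hi : i < l.length) :
    ∀ (st : List Nat) (ans : List Int), pvInv l i st ans →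
      (∀ j ∈ (pvPop l (l.getD i 0) i st ans).1, j ∈ st) ∧
      (pvPop l (l.getD i 0) i st ans).1.Pairwise (pvR l) ∧
      (∀ j ∈ (pvPop l (l.getD i 0) i st ans).1, j < i ∧ l.getD j 0 ≤ l.getD i 0) ∧
      (∀ j ∈ (pvPop l (l.getD i 0) i st ans).1, ∀ m, j < m → m < i → l.getD j 0 ≤ l.getD m 0) ∧
      (pvPop l (l.getD i 0) i st ans).2.length = ans.length ∧
      (∀ j, j < i → j ∉ (pvPop l (l.getD i 0) i st ans).1 →
        (pvPop l (l.getD i 0) i st ans).2.getD j 0 = pvTgt l j) := by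
  intro st
  induction st with
  | nil =>
    intro ans hinv
    obtain ⟨h1, h2, h3, h4, h5⟩ := hinv
    exact ⟨by simp [pvPop], by simp [pvPop], by simp [pvPop], by simp [pvPop], by simp [pvPop],
      fun j hj _ => by simpa [pvPop] using h5 j hj (by simp)⟩
  | cons j st ih =>
    intro ans hinv
    obtain ⟨h1, h2, h3, h4, h5⟩ := hinv
    rw [List.pairwise_cons] at h2
    have hjlt : j < i := h3 j (by simp)
    by_cases hc : pvDD l j > l.getD i 0
    · have hstep : pvPop l (l.getD i 0) i (j :: st) ans
          = pvPop l (l.getD i 0) i st (ans.set j ((i : Int) - (j : Int))) := by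
        simp only [pvPop, if_pos hc]
      have htgtj : pvTgt l j = (i : Int) - (j : Int) :=
        pvTgt_pop l j i hjlt hi (fun m hm1 hm2 => h4 j (by simp) m hm1 hm2) hc
      have hinv' : pvInv l i st (ans.set j ((i : Int) - (j : Int))) := by
        refine ⟨by simp [h1], h2.2, fun x hx => h3 x (by simp [hx]),
          fun x hx m hm1 hm2 => h4 x (by simp [hx]) m hm1 hm2, ?_⟩
        intro x hx hxst
        by_cases hxj : x = j
        · subst hxj
          rw [List.getD_eq_getElem?_getD, List.getElem?_set_self (by omega), Option.getD_some, htgtj]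
        · rw [List.getD_eq_getElem?_getD, List.getElem?_set_ne (fun h => hxj h.symm),
            ← List.getD_eq_getElem?_getD]
          exact h5 x hx (by simp [List.mem_cons, hxj, hxst])
      have := ih _ hinv'
      rw [hstep]
      refine ⟨fun x hx => by simp [this.1 x hx], this.2.1, this.2.2.1, this.2.2.2.1,
        by rw [this.2.2.2.2.1]; simp, this.2.2.2.2.2⟩
    · have hstep : pvPop l (l.getD i 0) i (j :: st) ans = (j :: st, ans) := by
        simp only [pvPop, if_neg hc]
      rw [hstep]
      have hdj : l.getD j 0 ≤ l.getD i 0 := by unfold pvDD at hc; omega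
      refine ⟨fun x hx => hx, List.pairwise_cons.mpr h2, ?_, h4, rfl, h5⟩
      intro x hx
      rcases List.mem_cons.mp hx with rfl | hx'
      · exact ⟨hjlt, hdj⟩
      · exact ⟨h3 x (by simp [hx']), le_trans (h2.1 x hx').2 hdj⟩

lemma pvGoB_inv (l : List Int) : ∀ (fuel k : Nat) (st : List Nat) (ans : List Int),
    l.length - k ≤ fuel → k ≤ l.length → pvInv l k st ans →
    pvInv l l.length (pvGoB l ((l.drop k).zipIdx k) st ans).1 (pvGoB l ((l.drop k).zipIdx k) st ans).2 := by
  intro fuel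
  induction fuel with
  | zero =>
    intro k st ans hfuel hk hinv
    have : k = l.length := by omega
    subst this
    simp only [List.drop_length, List.zipIdx_nil, pvGoB]
    exact hinv
  | succ f ih =>
    intro k st ans hfuel hk hinv
    by_cases hlt : k < l.length
    · rw [List.drop_eq_getElem_cons hlt, List.zipIdx_cons]
      have hget : l[k] = l.getD k 0 := (List.getD_eq_getElem l 0 hlt).symm
      simp only [pvGoB]
      rw [hget]
      have hp := pvPop_spec l k hlt st ans hinv
      set r := pvPop l (l.getD k 0) k st ans with hr
      have hinv' : pvInv l (k+1) (k :: r.1) r.2 := by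
        obtain ⟨hm, hpw, hlt2, hnd, hlen, hset⟩ := hp
        refine ⟨by rw [hlen]; exact hinv.1, ?_, ?_, ?_, ?_⟩
        · rw [List.pairwise_cons]
          exact ⟨fun x hx => ⟨(hlt2 x hx).1, (hlt2 x hx).2⟩, hpw⟩
        · intro x hx
          rcases List.mem_cons.mp hx with rfl | hx' <;> [omega; exact Nat.lt_succ_of_lt (hlt2 x hx').1]
        · intro x hx m hm1 hm2
          rcases List.mem_cons.mp hx with rfl | hx'
          · omega
          · by_cases hmk : m = k
            · subst hmk; exact (hlt2 x hx').2
            · exact hnd x hx' m hm1 (by omega)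
        · intro x hx hxst
          have hxk : x ≠ k := fun h => hxst (by rw [h]; exact List.mem_cons_self)
          exact hset x (by omega) (fun h => hxst (List.mem_cons_of_mem _ h))
      exact ih (k+1) (k :: r.1) r.2 (by omega) (by omega) hinv'
    · have : k = l.length := by omega
      subst this
      simp only [List.drop_length, List.zipIdx_nil, pvGoB]
      exact hinv

lemma fold_sets (n : Nat) : ∀ (js : List Nat) (ans : List Int), js.Nodup →
    (∀ j ∈ js, j < ans.length) →
    (js.foldl (fun a j => a.set j ((n : Int) - 1 - (j : Int))) ans).length = ans.length ∧
    (∀ x, (x ∈ js → (js.foldl (fun a j => a.set j ((n : Int) - 1 - (j : Int))) ans).getD x 0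
        = (n : Int) - 1 - (x : Int)) ∧
      (x ∉ js → (js.foldl (fun a j => a.set j ((n : Int) - 1 - (j : Int))) ans).getD x 0
        = ans.getD x 0)) := by
  intro js
  induction js with
  | nil => intro ans _ _; exact ⟨rfl, fun x => ⟨by simp, fun _ => rfl⟩⟩
  | cons j tl ih =>
    intro ans hnd hb
    rw [List.nodup_cons] at hnd
    have hjlen : j < ans.length := hb j (by simp)
    have hb' : ∀ x ∈ tl, x < (ans.set j ((n : Int) - 1 - (j : Int))).length := by
      intro x hx; rw [List.length_set]; exact hb x (by simp [hx])
    have := ih (ans.set j ((n : Int) - 1 - (j : Int))) hnd.2 hb'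
    simp only [List.foldl_cons]
    refine ⟨by rw [this.1, List.length_set], ?_⟩
    intro x
    constructor
    · intro hx
      rcases List.mem_cons.mp hx with rfl | hx'
      · rw [(this.2 x).2 hnd.1,
          List.getD_eq_getElem?_getD, List.getElem?_set_self hjlen, Option.getD_some]
      · exact (this.2 x).1 hx'
    · intro hx
      rw [(this.2 x).2 (fun h => hx (List.mem_cons_of_mem _ h)),
        List.getD_eq_getElem?_getD,
        List.getElem?_set_ne (fun h => hx (by rw [h]; exact List.mem_cons_self)),
        ← List.getD_eq_getElem?_getD]

lemma solution_alt_eq (l : List Int) : solution_alt l = (List.range l.length).map (pvTgt l) := by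
  have hinv0 : pvInv l 0 [] (List.replicate l.length 0) := by
    refine ⟨by simp, by simp, by simp, by simp, ?_⟩
    intro j hj; omega
  have h := pvGoB_inv l l.length 0 [] (List.replicate l.length 0) (by omega) (by omega) hinv0
  unfold solution_alt
  set r := pvGoB l l.zipIdx [] (List.replicate l.length 0) with hr
  have hdrop : (l.drop 0).zipIdx 0 = l.zipIdx := by simp
  rw [hdrop] at h
  obtain ⟨hlen, hpw, hbound, hnd, hset⟩ := h
  have hndup : r.1.reverse.Nodup := by
    rw [List.nodup_reverse]
    exact hpw.imp fun h => Nat.ne_of_gt h.1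
  have hbr : ∀ j ∈ r.1.reverse, j < r.2.length := by
    intro j hj; rw [hlen]; exact hbound j (List.mem_reverse.mp hj)
  have hf := fold_sets l.length r.1.reverse r.2 hndup hbr
  apply List.ext_getElem
  · rw [hf.1, hlen]; simp
  · intro i h1 h2
    have hin : i < l.length := by rw [hf.1, hlen] at h1; exact h1
    rw [List.getElem_map, List.getElem_range]
    rw [← List.getD_eq_getElem _ 0 h1]
    by_cases hmem : i ∈ r.1
    · rw [(hf.2 i).1 (List.mem_reverse.mpr hmem)]
      rw [pvTgt_none l i hin (fun m h1' h2' => hnd i hmem m h1' h2')]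
    · rw [(hf.2 i).2 (fun h => hmem (List.mem_reverse.mp h))]
      exact hset i hin hmem

-- ===== VERDICT (by name: the statement is the Claim_ definition above) =====
theorem solution_spec : Claim_equal_solution := by
  intro prices _
  unfold Spec_solution solution
  rw [pvGoA_eq, solution_alt_eq]
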